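-- pv_equiv track=rewrite | github.com/johnwashburne/major-gpa | analysis/parse_tables.py | course_num_split
-- ===== SOURCE A (Python) =====
-- digits = set(['1', '2', '3', '4', '5', '6', '7', '8', '9', '0'])
--
-- def course_num_split(s):
--     course = ""
--     num = ""
--     i = 0
--     while i < len(s):
--         if s[i] in digits:
--             break
--         course += s[i]
--         i += 1
--
--     while i < len(s):
--         num += s[i]
--         i += 1
--
--     return course + " " + num
-- ===== SOURCE B (Python) =====
-- import re
--
-- def course_num_split(s):
--     m = re.search(r'[0-9]', s)
--     i = m.start() if m else len(s)
--     return s[:i] + " " + s[i:]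
-- ===== Notes on version B (the rewrite author's own statement) =====
-- stated objective: faster
-- what changed: Replaces A's two manual char-by-char accumulating while-loops with a single regex search for the first ASCII digit followed by two slices at that index.
import Mathlib
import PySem

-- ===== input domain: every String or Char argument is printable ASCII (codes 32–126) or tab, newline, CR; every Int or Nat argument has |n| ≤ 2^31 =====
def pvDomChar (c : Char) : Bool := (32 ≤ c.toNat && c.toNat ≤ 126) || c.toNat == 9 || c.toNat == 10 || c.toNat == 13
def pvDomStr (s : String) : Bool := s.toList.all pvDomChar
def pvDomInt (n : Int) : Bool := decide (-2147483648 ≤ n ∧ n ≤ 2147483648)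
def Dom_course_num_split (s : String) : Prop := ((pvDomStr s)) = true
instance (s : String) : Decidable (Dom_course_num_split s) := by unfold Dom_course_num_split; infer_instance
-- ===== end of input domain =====

-- B replaces A's two accumulating while-loops by finding the first ASCII-digit index and slicing there (idiomatic, single pass).

-- ===== PORT A =====
def digitsA : List Char := ['1', '2', '3', '4', '5', '6', '7', '8', '9', '0']

-- first while loop: accumulate into `course` until a digit is seen
def courseLoopA : List Char → List Char → List Char × List Char
  | [], course => (course, [])
  | c :: rest, course =>
    if digitsA.contains c then (course, c :: rest)
    else courseLoopA rest (course ++ [c])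

-- second while loop: accumulate the remainder into `num`
def numLoopA : List Char → List Char → List Char
  | [], num => num
  | c :: rest, num => numLoopA rest (num ++ [c])

def course_num_split (s : String) : String :=
  let r := courseLoopA s.toList []
  String.mk r.1 ++ " " ++ String.mk (numLoopA r.2 [])

-- ===== PORT B =====
def isDigB (c : Char) : Bool := "0123456789".toList.contains c

def course_num_split_alt (s : String) : String :=
  let l := s.toList
  let i := l.findIdx isDigB        -- re.search start, or len(s) if no match
  String.mk (l.take i) ++ " " ++ String.mk (l.drop i)

-- ===== PRECONDITION & SPEC =====
def Spec_course_num_split (s : String) (out : String) : Prop := out = course_num_split_alt s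
instance (s : String) (out : String) : Decidable (Spec_course_num_split s out) := by unfold Spec_course_num_split; infer_instance

-- ===== CLAIM (what is proved, stated in full; the proofs are below) =====
def Claim_equal_course_num_split : Prop := ∀ (s : String), Dom_course_num_split s → Spec_course_num_split s (course_num_split s)

-- ===== LEMMAS AND PROOFS =====
theorem dig_eq (c : Char) : digitsA.contains c = isDigB c := by
  have h : ("0123456789".toList) = ['0','1','2','3','4','5','6','7','8','9'] := rfl
  simp only [digitsA, isDigB, h, List.contains_eq_mem, List.mem_cons, List.not_mem_nil]
  by_cases h1 : c ∈ (['1','2','3','4','5','6','7','8','9','0'] : List Char) <;>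
    by_cases h2 : c ∈ (['0','1','2','3','4','5','6','7','8','9'] : List Char) <;>
    simp_all [List.mem_cons]

theorem courseLoopA_eq (l acc : List Char) :
    courseLoopA l acc = (acc ++ l.takeWhile (fun c => !isDigB c), l.dropWhile (fun c => !isDigB c)) := by
  induction l generalizing acc with
  | nil => simp [courseLoopA]
  | cons c rest ih =>
    simp only [courseLoopA, dig_eq]
    by_cases h : isDigB c
    · simp [h]
    · simp [h, ih]

theorem numLoopA_eq (l acc : List Char) : numLoopA l acc = acc ++ l := by
  induction l generalizing acc with
  | nil => simp [numLoopA]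
  | cons c rest ih => simp [numLoopA, ih]

theorem findIdx_takeWhile (p : Char → Bool) (l : List Char) :
    l.takeWhile (fun c => !p c) = l.take (l.findIdx p) := by
  induction l with
  | nil => simp
  | cons c rest ih =>
    by_cases h : p c
    · simp [List.findIdx_cons, h]
    · simp [List.findIdx_cons, h, ih]

theorem dropWhile_takeWhile (p : Char → Bool) (l : List Char) :
    l.dropWhile (fun c => !p c) = l.drop (l.findIdx p) := by
  induction l with
  | nil => simp
  | cons c rest ih =>
    by_cases h : p c
    · simp [List.findIdx_cons, h]
    · simp [List.findIdx_cons, h, ih]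

-- ===== VERDICT (by name: the statement is the Claim_ definition above) =====
theorem course_num_split_spec : Claim_equal_course_num_split := by
  intro s _
  unfold Spec_course_num_split course_num_split course_num_split_alt
  simp [courseLoopA_eq, numLoopA_eq, findIdx_takeWhile, dropWhile_takeWhile]
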